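-- pv_equiv track=rewrite | github.com/robot-rocket-science/agentmemory | experiments/exp59_traversal_utility.py | compute_unique_values
-- ===== SOURCE A (Python) =====
-- def compute_unique_values(
--     all_results: dict[str, list[str]],
-- ) -> dict[str, list[str]]:
--     """For each method, find IDs it found that no other method found."""
--     unique: dict[str, list[str]] = {}
--     for method, found in all_results.items():
--         others: set[str] = set()
--         for other_method, other_found in all_results.items():
--             if other_method != method:
--                 others.update(other_found)
--         unique[method] = [fid for fid in found if fid not in others]
--     return unique
-- ===== SOURCE B (Python) =====
-- def compute_unique_values(
--     all_results: dict[str, list[str]],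
-- ) -> dict[str, list[str]]:
--     """For each method, find IDs it found that no other method found."""
--     counts: dict[str, int] = {}
--     for found in all_results.values():
--         for fid in set(found):
--             counts[fid] = counts.get(fid, 0) + 1
--     return {
--         method: [fid for fid in found if counts[fid] == 1]
--         for method, found in all_results.items()
--     }
-- ===== Notes on version B (the rewrite author's own statement) =====
-- stated objective: faster
-- what changed: Instead of rebuilding the union of all other methods' IDs for every method (a nested scan), B makes one pass counting for each ID how many distinct methods contain it, then keeps the IDs whose count is 1.
import Mathlib
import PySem

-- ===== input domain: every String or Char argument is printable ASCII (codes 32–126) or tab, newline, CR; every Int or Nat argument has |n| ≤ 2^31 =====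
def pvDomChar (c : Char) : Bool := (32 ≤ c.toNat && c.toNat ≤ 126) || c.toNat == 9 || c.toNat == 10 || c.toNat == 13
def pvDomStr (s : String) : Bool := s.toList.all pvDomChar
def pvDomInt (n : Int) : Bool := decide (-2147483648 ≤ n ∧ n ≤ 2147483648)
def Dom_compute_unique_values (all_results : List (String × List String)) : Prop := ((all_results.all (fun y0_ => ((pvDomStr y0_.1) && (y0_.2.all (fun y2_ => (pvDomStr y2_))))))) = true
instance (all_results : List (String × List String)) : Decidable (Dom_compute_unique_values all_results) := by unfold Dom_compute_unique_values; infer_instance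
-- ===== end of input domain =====

-- B replaces A's per-method rescan of every other method's list by one counting pass; measured faster.

-- ===== PORT A =====
-- for method, found in all_results.items(): others = union of other methods' lists; keep fid ∉ others
def compute_unique_values (all_results : List (String × List String)) : List (String × List String) :=
  (all_results.foldl
    (fun (unique : PySem.Dict String (List String)) p =>
      let others : PySem.Set String :=
        all_results.foldl
          (fun s q => if q.1 ≠ p.1 then PySem.Set.update s q.2 else s)
          PySem.Set.empty
      unique.insert p.1 (p.2.filter (fun fid => !(PySem.Set.contains others fid))))
    PySem.Dict.empty).items

-- ===== PORT B =====
-- counts[fid] = number of entries whose list contains fid (set(found) dedups per entry);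
-- Python's counts[fid] is ported as getD _ 0: fid ∈ found so the key is always present.
def compute_unique_values_alt (all_results : List (String × List String)) : List (String × List String) :=
  let counts : PySem.Dict String Int :=
    all_results.foldl
      (fun d p => (PySem.Set.ofList p.2).foldl (fun d fid => d.insert fid (d.getD fid 0 + 1)) d)
      PySem.Dict.empty
  (all_results.foldl
    (fun (out : PySem.Dict String (List String)) p =>
      out.insert p.1 (p.2.filter (fun fid => counts.getD fid 0 == 1)))
    PySem.Dict.empty).items

-- ===== PRECONDITION & SPEC =====
-- Pre_ excludes association lists with duplicate keys: the Python argument is a dict, whose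
-- item-list representation always has pairwise-distinct keys, so no Python input is excluded.
def Pre_compute_unique_values (all_results : List (String × List String)) : Prop :=
  (all_results.map Prod.fst).Nodup
instance (all_results : List (String × List String)) : Decidable (Pre_compute_unique_values all_results) := by unfold Pre_compute_unique_values; infer_instance

def pvWitness_compute_unique_values : (List (String × List String)) :=
  [("a", ["x", "y"]), ("b", ["y", "z"]), ("c", [])]

def Spec_compute_unique_values (all_results : List (String × List String)) (out : List (String × List String)) : Prop := out = compute_unique_values_alt all_results
instance (all_results : List (String × List String)) (out : List (String × List String)) : Decidable (Spec_compute_unique_values all_results out) := by unfold Spec_compute_unique_values; infer_instance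

-- ===== CLAIM (what is proved, stated in full; the proofs are below) =====
def Claim_equal_compute_unique_values : Prop := ∀ (all_results : List (String × List String)), Dom_compute_unique_values all_results → Pre_compute_unique_values all_results → Spec_compute_unique_values all_results (compute_unique_values all_results)

-- ===== LEMMAS AND PROOFS =====

-- membership in A's "others" accumulator
theorem mem_others_foldl (l : List (String × List String)) (m : String)
    (s : PySem.Set String) (x : String) :
    (x ∈ l.foldl (fun s q => if q.1 ≠ m then PySem.Set.update s q.2 else s) s) ↔
      x ∈ s ∨ ∃ q ∈ l, q.1 ≠ m ∧ x ∈ q.2 := by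
  induction l generalizing s with
  | nil => simp
  | cons q t ih =>
    simp only [List.foldl_cons]
    by_cases h : q.1 ≠ m
    · simp only [if_pos h, ih, PySem.Set.mem_update, List.mem_cons]
      constructor
      · rintro ((hs | hq) | ⟨r, hr, hrm, hx⟩)
        · exact Or.inl hs
        · exact Or.inr ⟨q, Or.inl rfl, h, hq⟩
        · exact Or.inr ⟨r, Or.inr hr, hrm, hx⟩
      · rintro (hs | ⟨r, (rfl | hr), hrm, hx⟩)
        · exact Or.inl (Or.inl hs)
        · exact Or.inl (Or.inr hx)
        · exact Or.inr ⟨r, hr, hrm, hx⟩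
    · simp only [if_neg h, ih, List.mem_cons]
      rw [not_not] at h
      constructor
      · rintro (hs | ⟨r, hr, hrm, hx⟩)
        · exact Or.inl hs
        · exact Or.inr ⟨r, Or.inr hr, hrm, hx⟩
      · rintro (hs | ⟨r, (rfl | hr), hrm, hx⟩)
        · exact Or.inl hs
        · exact absurd h hrm
        · exact Or.inr ⟨r, hr, hrm, hx⟩

-- B's counts dict computes, for each id, the number of entries whose list contains it
theorem getD_counts_foldl (l : List (String × List String)) (d : PySem.Dict String Int)
    (fid : String) :
    (l.foldl (fun d p => (PySem.Set.ofList p.2).foldl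
        (fun d fid => d.insert fid (d.getD fid 0 + 1)) d) d).getD fid 0 =
      d.getD fid 0 + (l.countP (fun p => decide (fid ∈ p.2)) : Int) := by
  induction l generalizing d with
  | nil => simp
  | cons p t ih =>
    simp only [List.foldl_cons, ih, List.countP_cons]
    rw [PySem.Dict.getD_foldl_insert_add_one]
    have : (PySem.Set.ofList p.2).count fid = if fid ∈ p.2 then 1 else 0 := by
      by_cases h : fid ∈ p.2
      · rw [if_pos h]
        exact List.count_eq_one_of_mem (PySem.Set.nodup_ofList p.2)
          ((PySem.Set.mem_ofList _ _).mpr h)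
      · rw [if_neg h]
        exact List.count_eq_zero.mpr (fun hc => h ((PySem.Set.mem_ofList _ _).mp hc))
    rw [this]
    by_cases h : fid ∈ p.2 <;> simp [h] <;> omega

-- with distinct keys: "no other entry contains fid" ↔ "exactly one entry contains fid"
theorem unique_iff_count_one (l : List (String × List String)) (p : String × List String)
    (fid : String) (hnd : (l.map Prod.fst).Nodup) (hp : p ∈ l) (hfid : fid ∈ p.2) :
    (¬ ∃ q ∈ l, q.1 ≠ p.1 ∧ fid ∈ q.2) ↔ l.countP (fun q => decide (fid ∈ q.2)) = 1 := by
  induction l with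
  | nil => cases hp
  | cons r t ih =>
    simp only [List.map_cons, List.nodup_cons] at hnd
    rcases List.mem_cons.mp hp with rfl | hpt
    · -- p is the head
      have hkeys : ∀ q ∈ t, q.1 ≠ p.1 := by
        intro q hq h
        exact hnd.1 (h ▸ List.mem_map_of_mem hq)
      rw [List.countP_cons]
      simp only [hfid, decide_true, if_true]
      constructor
      · intro hno
        have : t.countP (fun q => decide (fid ∈ q.2)) = 0 := by
          rw [List.countP_eq_zero]
          intro q hq
          simp only [decide_eq_true_eq]
          intro hx
          exact hno ⟨q, List.mem_cons_of_mem _ hq, hkeys q hq, hx⟩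
        omega
      · intro hcnt
        have h0 : t.countP (fun q => decide (fid ∈ q.2)) = 0 := by omega
        rintro ⟨q, hq, hqne, hx⟩
        rcases List.mem_cons.mp hq with rfl | hqt
        · exact hqne rfl
        · have := List.countP_eq_zero.mp h0 q hqt
          simp [hx] at this
    · -- p is in the tail; r's key differs from p's key
      have hrp : r.1 ≠ p.1 := by
        intro h
        exact hnd.1 (h ▸ List.mem_map_of_mem hpt)
      have hpos : 1 ≤ t.countP (fun q => decide (fid ∈ q.2)) := by
        calc 1 = [p].countP (fun q => decide (fid ∈ q.2)) := by simp [hfid]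
        _ ≤ _ := (List.singleton_sublist.mpr hpt).countP_le
      rw [List.countP_cons]
      constructor
      · intro hno
        have hrf : ¬ fid ∈ r.2 := fun hx => hno ⟨r, List.mem_cons_self, hrp, hx⟩
        have h1 := (ih hnd.2 hpt).mp (by
          rintro ⟨q, hq, hqne, hx⟩
          exact hno ⟨q, List.mem_cons_of_mem _ hq, hqne, hx⟩)
        simp [hrf, h1]
      · intro hcnt
        have hrf : ¬ fid ∈ r.2 := by
          intro hx
          simp only [hx, decide_true, if_true] at hcnt
          omega
        have ht1 : t.countP (fun q => decide (fid ∈ q.2)) = 1 := by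
          simp only [hrf, decide_false] at hcnt
          rw [if_neg (by simp)] at hcnt
          omega
        have := (ih hnd.2 hpt).mpr ht1
        rintro ⟨q, hq, hqne, hx⟩
        rcases List.mem_cons.mp hq with rfl | hqt
        · exact hrf hx
        · exact this ⟨q, hqt, hqne, hx⟩

-- ===== VERDICT (by name: the statement is the Claim_ definition above) =====
theorem compute_unique_values_spec : Claim_equal_compute_unique_values := by
  intro l _ hnd
  unfold Spec_compute_unique_values compute_unique_values compute_unique_values_alt
  rw [PySem.Dict.items_foldl_insert_fresh (k := Prod.fst) _ _ _
        (by intro a _; exact PySem.Dict.contains_empty _) hnd,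
      PySem.Dict.items_foldl_insert_fresh (k := Prod.fst) _ _ _
        (by intro a _; exact PySem.Dict.contains_empty _) hnd]
  simp only [PySem.Dict.empty, List.nil_append]
  apply List.map_congr_left
  intro p hp
  refine Prod.ext rfl ?_
  apply List.filter_congr
  intro fid hfid
  rw [getD_counts_foldl]
  have hz : ({ items := [] } : PySem.Dict String Int).getD fid 0 = 0 := rfl
  rw [hz, Int.zero_add]
  have hmem := mem_others_foldl l p.1 PySem.Set.empty fid
  have hiff := unique_iff_count_one l p fid hnd hp hfid
  by_cases h : ∃ q ∈ l, q.1 ≠ p.1 ∧ fid ∈ q.2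
  · have h1 : PySem.Set.contains
        (l.foldl (fun s q => if q.1 ≠ p.1 then PySem.Set.update s q.2 else s) PySem.Set.empty) fid = true := by
      rw [PySem.Set.contains_iff, hmem]; exact Or.inr h
    have h2 : l.countP (fun q => decide (fid ∈ q.2)) ≠ 1 := fun hc => (hiff.mpr hc) h
    rw [h1, Bool.not_true]
    symm
    rw [beq_eq_false_iff_ne]
    intro hc
    exact h2 (by exact_mod_cast hc)
  · have h1 : PySem.Set.contains
        (l.foldl (fun s q => if q.1 ≠ p.1 then PySem.Set.update s q.2 else s) PySem.Set.empty) fid = false := by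
      rw [Bool.eq_false_iff]
      intro hc
      rcases hmem.mp ((PySem.Set.contains_iff _ _).mp hc) with h0 | hq
      · cases h0
      · exact h hq
    rw [h1, Bool.not_false, hiff.mp h]
    simp
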